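-- pv_equiv track=rewrite | github.com/yanglinguan/Natto | sbin/run-exp.py | sort_run_list
-- ===== SOURCE A (Python) =====
-- def getSortkey(f):
--     key = (f[0].split(".")[0]).split("-")[-1]
--     return int(key)
--
-- def sort_run_list(run_list):
--     exp_list = ["txnRate","zipfAlpha", "workload_highPriority"]
--     result_map = {}
--     not_found = []
--     for rc in run_list:
--         f = rc[0].split("-")[1]
--         found = False
--         for e in exp_list:
--             if f.startswith(e):
--                 if e not in result_map:
--                     result_map[e] = []
--                 result_map[e].append(rc)
--                 found = True
--                 break
--         if not found:
--             not_found.append(rc)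
--     result_list = []
--     for e in exp_list:
--         if e in result_map:
--             result_map[e].sort(key=getSortkey)
--             result_list.append(result_map[e])
--     if len(not_found) != 0:
--         result_list.append(not_found)
--     return result_list
-- ===== SOURCE B (Python) =====
-- def getSortkey(f):
--     key = (f[0].split(".")[0]).split("-")[-1]
--     return int(key)
--
-- def sort_run_list(run_list):
--     exp_list = ["txnRate", "zipfAlpha", "workload_highPriority"]
--     def prefix_of(rc):
--         return rc[0].split("-")[1]
--     result_list = []
--     for e in exp_list:
--         bucket = sorted((rc for rc in run_list if prefix_of(rc).startswith(e)), key=getSortkey)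
--         if bucket:
--             result_list.append(bucket)
--     not_found = [rc for rc in run_list
--                  if not any(prefix_of(rc).startswith(e) for e in exp_list)]
--     if not_found:
--         result_list.append(not_found)
--     return result_list
-- ===== Notes on version B (the rewrite author's own statement) =====
-- stated objective: simpler
-- what changed: A makes one pass over run_list distributing items into a dict of buckets keyed by the first matching prefix and then walks the prefix list reading the dict back; B drops the dict entirely and, for each prefix, builds its bucket by filtering run_list directly (the prefixes start with distinct letters so first-match equals plain startswith), with one final filter for the unmatched items.
import Mathlib
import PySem

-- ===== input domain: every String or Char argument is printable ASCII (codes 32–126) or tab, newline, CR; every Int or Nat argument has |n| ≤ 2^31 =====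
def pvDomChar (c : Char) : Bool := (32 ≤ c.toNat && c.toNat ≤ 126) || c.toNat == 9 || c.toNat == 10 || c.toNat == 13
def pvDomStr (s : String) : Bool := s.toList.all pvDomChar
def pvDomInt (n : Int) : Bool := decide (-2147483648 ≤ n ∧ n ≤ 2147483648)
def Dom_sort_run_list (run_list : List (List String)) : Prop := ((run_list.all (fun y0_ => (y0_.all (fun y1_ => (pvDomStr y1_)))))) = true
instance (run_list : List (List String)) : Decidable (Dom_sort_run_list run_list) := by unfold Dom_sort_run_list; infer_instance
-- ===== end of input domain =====

-- B inverts A's decomposition: instead of one pass distributing items into a dict of buckets,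
-- it builds each prefix's bucket by a direct filter over run_list (objective: simpler; same cost class).
-- Pre_ excludes inputs where the Python raises (IndexError on rc[0]/split, ValueError on int(key)).

-- ===== PORT A =====
def pvExpList : List String := ["txnRate", "zipfAlpha", "workload_highPriority"]

-- shared module-level helper getSortkey (used by both Pythons)
def getSortkeyL (f : List String) : Int :=
  let s0 := (PySem.List.pyGet? f 0).getD ""
  let p1 := (PySem.List.pyGet? ((PySem.Str.split? s0 ".").getD []) 0).getD ""
  let key := (PySem.List.pyGet? ((PySem.Str.split? p1 "-").getD []) (-1)).getD ""
  (PySem.Int.ofStr? key).getD 0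

-- A's inner 'for e in exp_list: … break' loop (returns the updated dict and the 'found' flag)
def pvInner (f : String) (rm : PySem.Dict String (List (List String))) (rc : List String) :
    List String → (PySem.Dict String (List (List String)) × Bool)
  | [] => (rm, false)
  | e :: rest =>
    if PySem.Str.startswith f e then (rm.modify e [] (· ++ [rc]), true)
    else pvInner f rm rc rest

def pvStepA (st : PySem.Dict String (List (List String)) × List (List String))
    (rc : List String) : PySem.Dict String (List (List String)) × List (List String) :=
  let f := (PySem.List.pyGet? ((PySem.Str.split? ((PySem.List.pyGet? rc 0).getD "") "-").getD []) 1).getD ""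
  let r := pvInner f st.1 rc pvExpList
  if r.2 then (r.1, st.2) else (r.1, st.2 ++ [rc])

def sort_run_list (run_list : List (List String)) : List (List (List String)) :=
  let st := run_list.foldl pvStepA (PySem.Dict.empty, [])
  let result_list := pvExpList.foldl
    (fun acc e =>
      if st.1.contains e then acc ++ [PySem.List.sorted (st.1.getD e []) getSortkeyL false]
      else acc) []
  if st.2.length ≠ 0 then result_list ++ [st.2] else result_list

-- ===== PORT B =====
def pvPrefixOf (rc : List String) : String :=
  (PySem.List.pyGet? ((PySem.Str.split? ((PySem.List.pyGet? rc 0).getD "") "-").getD []) 1).getD ""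

def sort_run_list_alt (run_list : List (List String)) : List (List (List String)) :=
  let result_list := pvExpList.foldl
    (fun acc e =>
      let bucket := PySem.List.sorted
        (run_list.filter (fun rc => PySem.Str.startswith (pvPrefixOf rc) e)) getSortkeyL false
      if bucket ≠ [] then acc ++ [bucket] else acc) []
  let not_found := run_list.filter
    (fun rc => ! pvExpList.any (fun e => PySem.Str.startswith (pvPrefixOf rc) e))
  if not_found ≠ [] then result_list ++ [not_found] else result_list

-- ===== PRECONDITION & SPEC =====
-- Pre_ excludes exactly the inputs where Python A raises: an empty rc or rc[0] without '-'
-- (IndexError), and a bucketed rc whose sort key is not an int literal (ValueError in getSortkey).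
def Pre_sort_run_list (run_list : List (List String)) : Prop :=
  ∀ rc ∈ run_list, rc ≠ [] ∧
    1 < ((PySem.Str.split? ((PySem.List.pyGet? rc 0).getD "") "-").getD []).length ∧
    (pvExpList.any (fun e => PySem.Str.startswith (pvPrefixOf rc) e) = true →
      (PySem.Int.ofStr?
        ((PySem.List.pyGet?
          ((PySem.Str.split? ((PySem.List.pyGet? ((PySem.Str.split? ((PySem.List.pyGet? rc 0).getD "") ".").getD []) 0).getD "") "-").getD []) (-1)).getD "")).isSome = true)
instance (run_list : List (List String)) : Decidable (Pre_sort_run_list run_list) := by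
  unfold Pre_sort_run_list; infer_instance

def pvWitness_sort_run_list : List (List String) := [["a-txnRate-1.log"], ["a-other-x"]]

def Spec_sort_run_list (run_list : List (List String)) (out : List (List (List String))) : Prop := out = sort_run_list_alt run_list
instance (run_list : List (List String)) (out : List (List (List String))) : Decidable (Spec_sort_run_list run_list out) := by unfold Spec_sort_run_list; infer_instance

-- ===== CLAIM (what is proved, stated in full; the proofs are below) =====
def Claim_equal_sort_run_list : Prop := ∀ (run_list : List (List String)), Dom_sort_run_list run_list → Pre_sort_run_list run_list → Spec_sort_run_list run_list (sort_run_list run_list)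

-- ===== LEMMAS AND PROOFS =====

-- The three prefixes start with distinct letters, so a string can start with at most one of them.
lemma pv_excl (f e e' : String) (he : e ∈ pvExpList) (he' : e' ∈ pvExpList)
    (hne : e ≠ e') (h : PySem.Str.startswith f e = true)
    (h' : PySem.Str.startswith f e' = true) : False := by
  rw [PySem.Str.startswith_eq] at h h'
  have hp : e.toList <+: f.toList := (PySem.Chars.startswith_iff _ _).mp h
  have hp' : e'.toList <+: f.toList := (PySem.Chars.startswith_iff _ _).mp h'
  have hor := List.prefix_or_prefix_of_prefix hp hp'
  simp only [pvExpList, List.mem_cons, List.not_mem_nil, or_false] at he he'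
  rcases he with rfl | rfl | rfl <;> rcases he' with rfl | rfl | rfl <;>
    first
      | exact hne rfl
      | (rcases hor with hx | hx <;> revert hx <;> decide)

lemma pv_hex (f : String) : ∀ a ∈ pvExpList, ∀ b ∈ pvExpList, a ≠ b →
    PySem.Str.startswith f a = true → PySem.Str.startswith f b = false := by
  intro a ha b hb hne hsa
  by_contra hc
  exact pv_excl f a b ha hb hne hsa
    (by revert hc; cases PySem.Str.startswith f b <;> simp)

lemma pvInner_snd (f : String) (rm : PySem.Dict String (List (List String)))
    (rc : List String) (es : List String) :
    (pvInner f rm rc es).2 = es.any (fun e => PySem.Str.startswith f e) := by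
  induction es with
  | nil => simp [pvInner]
  | cons e rest ih =>
    simp only [pvInner, List.any_cons]
    by_cases h : PySem.Chars.startswith f.toList e.toList = true <;>
      simp [h, ih]

lemma pvInner_fst_getD (f : String) (rm : PySem.Dict String (List (List String)))
    (rc : List String) (es : List String) (e : String)
    (hex : ∀ a ∈ es, ∀ b ∈ es, a ≠ b → PySem.Str.startswith f a = true →
      PySem.Str.startswith f b = false) :
    (pvInner f rm rc es).1.getD e [] =
      if e ∈ es ∧ PySem.Str.startswith f e = true then rm.getD e [] ++ [rc]
      else rm.getD e [] := by
  induction es generalizing rm with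
  | nil => simp [pvInner]
  | cons a rest ih =>
    simp only [pvInner, PySem.Str.startswith_eq]
    by_cases ha : PySem.Chars.startswith f.toList a.toList = true
    · rw [if_pos ha, PySem.Dict.getD_modify]
      by_cases hea : e = a
      · subst hea; simp [ha]
      · have hcond : ¬ (e ∈ a :: rest ∧ PySem.Chars.startswith f.toList e.toList = true) := by
          rintro ⟨hmem, hsw⟩
          rcases List.mem_cons.mp hmem with rfl | hr
          · exact hea rfl
          · have hb := hex a (by simp) e (by simp [hr]) (fun hh => hea hh.symm)
              (by rw [PySem.Str.startswith_eq]; exact ha)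
            rw [PySem.Str.startswith_eq] at hb
            rw [hb] at hsw; exact Bool.false_ne_true hsw
        rw [if_neg hea, if_neg hcond]
    · rw [if_neg ha, ih rm (fun x hx y hy => hex x (by simp [hx]) y (by simp [hy]))]
      by_cases hea : e = a
      · subst hea; simp [ha]
      · simp [List.mem_cons, hea]

lemma pvInner_fst_contains (f : String) (rm : PySem.Dict String (List (List String)))
    (rc : List String) (es : List String) (e : String)
    (hex : ∀ a ∈ es, ∀ b ∈ es, a ≠ b → PySem.Str.startswith f a = true →
      PySem.Str.startswith f b = false) :
    (pvInner f rm rc es).1.contains e =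
      ((decide (e ∈ es) && PySem.Str.startswith f e) || rm.contains e) := by
  induction es generalizing rm with
  | nil => simp [pvInner]
  | cons a rest ih =>
    simp only [pvInner, PySem.Str.startswith_eq]
    by_cases ha : PySem.Chars.startswith f.toList a.toList = true
    · rw [if_pos ha, PySem.Dict.contains_modify]
      by_cases hea : e = a
      · subst hea; simp [ha]
      · have hff : (decide (e ∈ a :: rest) && PySem.Chars.startswith f.toList e.toList) = false := by
          by_cases hr : e ∈ rest
          · have hb := hex a (by simp) e (by simp [hr]) (fun hh => hea hh.symm)
              (by rw [PySem.Str.startswith_eq]; exact ha)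
            rw [PySem.Str.startswith_eq] at hb
            simp [hb]
          · simp [List.mem_cons, hea, hr]
        rw [hff]
        simp [hea]
    · rw [if_neg ha, ih rm (fun x hx y hy => hex x (by simp [hx]) y (by simp [hy]))]
      by_cases hea : e = a
      · subst hea; simp [ha]
      · simp [List.mem_cons, hea]

lemma pv_stepA_fst (st : PySem.Dict String (List (List String)) × List (List String))
    (rc : List String) :
    (pvStepA st rc).1 = (pvInner (pvPrefixOf rc) st.1 rc pvExpList).1 := by
  simp only [pvStepA, pvPrefixOf]
  split <;> rfl

lemma pv_stepA_snd (st : PySem.Dict String (List (List String)) × List (List String))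
    (rc : List String) :
    (pvStepA st rc).2 =
      if pvExpList.any (fun e => PySem.Str.startswith (pvPrefixOf rc) e) then st.2
      else st.2 ++ [rc] := by
  simp only [pvStepA, pvPrefixOf]
  rw [pvInner_snd]
  by_cases h : (pvExpList.any fun e => PySem.Str.startswith
      ((PySem.List.pyGet? ((PySem.Str.split? ((PySem.List.pyGet? rc 0).getD "") "-").getD []) 1).getD "") e) = true
  · rw [if_pos h, if_pos h]
  · rw [if_neg h, if_neg h]

lemma pv_foldA_snd (l : List (List String))
    (rm : PySem.Dict String (List (List String))) (nf : List (List String)) :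
    (l.foldl pvStepA (rm, nf)).2 =
      nf ++ l.filter (fun rc => ! pvExpList.any (fun e => PySem.Str.startswith (pvPrefixOf rc) e)) := by
  induction l generalizing rm nf with
  | nil => simp
  | cons rc rest ih =>
    rcases hst : pvStepA (rm, nf) rc with ⟨rm2, nf2⟩
    have h2 : nf2 = (pvStepA (rm, nf) rc).2 := by rw [hst]
    simp only [List.foldl_cons, hst, List.filter_cons]
    rw [ih rm2 nf2, h2, pv_stepA_snd]
    by_cases h : (pvExpList.any fun e => PySem.Str.startswith (pvPrefixOf rc) e) = true
    · rw [if_pos h]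
      simp only [h, Bool.not_true, Bool.false_eq_true, if_false]
    · rw [if_neg h]
      have hb : (pvExpList.any fun e => PySem.Str.startswith (pvPrefixOf rc) e) = false := by
        cases hx : (pvExpList.any fun e => PySem.Str.startswith (pvPrefixOf rc) e) with
        | false => rfl
        | true => exact absurd hx h
      simp only [hb, Bool.not_false, if_true, List.append_assoc, List.singleton_append]

lemma pv_foldA_getD (l : List (List String))
    (rm : PySem.Dict String (List (List String))) (nf : List (List String))
    (e : String) (he : e ∈ pvExpList) :
    (l.foldl pvStepA (rm, nf)).1.getD e [] =
      rm.getD e [] ++ l.filter (fun rc => PySem.Str.startswith (pvPrefixOf rc) e) := by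
  induction l generalizing rm nf with
  | nil => simp
  | cons rc rest ih =>
    rcases hst : pvStepA (rm, nf) rc with ⟨rm2, nf2⟩
    have h1 : rm2 = (pvStepA (rm, nf) rc).1 := by rw [hst]
    simp only [List.foldl_cons, hst]
    rw [ih rm2 nf2, h1, pv_stepA_fst,
      pvInner_fst_getD _ _ _ _ _ (pv_hex (pvPrefixOf rc))]
    simp only [List.filter_cons]
    by_cases h : PySem.Str.startswith (pvPrefixOf rc) e = true
    · rw [if_pos ⟨he, h⟩, if_pos h]
      simp only [List.append_assoc, List.singleton_append]
    · rw [if_neg (fun hc => h hc.2), if_neg h]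

lemma pv_foldA_contains (l : List (List String))
    (rm : PySem.Dict String (List (List String))) (nf : List (List String))
    (e : String) (he : e ∈ pvExpList) :
    (l.foldl pvStepA (rm, nf)).1.contains e =
      (rm.contains e || !(l.filter (fun rc => PySem.Str.startswith (pvPrefixOf rc) e)).isEmpty) := by
  induction l generalizing rm nf with
  | nil => simp
  | cons rc rest ih =>
    rcases hst : pvStepA (rm, nf) rc with ⟨rm2, nf2⟩
    have h1 : rm2 = (pvStepA (rm, nf) rc).1 := by rw [hst]
    simp only [List.foldl_cons, hst]
    rw [ih rm2 nf2, h1, pv_stepA_fst,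
      pvInner_fst_contains _ _ _ _ _ (pv_hex (pvPrefixOf rc))]
    simp only [List.filter_cons]
    by_cases h : PySem.Str.startswith (pvPrefixOf rc) e = true
    · rw [if_pos h]
      have ht : (decide (e ∈ pvExpList) && PySem.Str.startswith (pvPrefixOf rc) e) = true := by
        rw [h]; simp [he]
      rw [ht]
      simp
    · rw [if_neg h]
      have hb : PySem.Str.startswith (pvPrefixOf rc) e = false := by
        cases hx : PySem.Str.startswith (pvPrefixOf rc) e with
        | false => rfl
        | true => exact absurd hx h
      rw [hb]
      simp

lemma pv_equal (run_list : List (List String)) :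
    sort_run_list run_list = sort_run_list_alt run_list := by
  have hnf := pv_foldA_snd run_list PySem.Dict.empty []
  rw [List.nil_append] at hnf
  have hDt := pv_foldA_getD run_list PySem.Dict.empty [] "txnRate" (by simp [pvExpList])
  rw [PySem.Dict.getD_empty, List.nil_append] at hDt
  have hDz := pv_foldA_getD run_list PySem.Dict.empty [] "zipfAlpha" (by simp [pvExpList])
  rw [PySem.Dict.getD_empty, List.nil_append] at hDz
  have hDw := pv_foldA_getD run_list PySem.Dict.empty [] "workload_highPriority" (by simp [pvExpList])
  rw [PySem.Dict.getD_empty, List.nil_append] at hDw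
  have hCt := pv_foldA_contains run_list PySem.Dict.empty [] "txnRate" (by simp [pvExpList])
  rw [PySem.Dict.contains_empty, Bool.false_or] at hCt
  have hCz := pv_foldA_contains run_list PySem.Dict.empty [] "zipfAlpha" (by simp [pvExpList])
  rw [PySem.Dict.contains_empty, Bool.false_or] at hCz
  have hCw := pv_foldA_contains run_list PySem.Dict.empty [] "workload_highPriority" (by simp [pvExpList])
  rw [PySem.Dict.contains_empty, Bool.false_or] at hCw
  simp only [sort_run_list, sort_run_list_alt, pvExpList, List.foldl_cons, List.foldl_nil]
  simp only [pvExpList] at hnf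
  rw [hnf, hDt, hDz, hDw, hCt, hCz, hCw]
  generalize run_list.filter (fun rc => PySem.Str.startswith (pvPrefixOf rc) "txnRate") = Ft
  generalize run_list.filter (fun rc => PySem.Str.startswith (pvPrefixOf rc) "zipfAlpha") = Fz
  generalize run_list.filter (fun rc => PySem.Str.startswith (pvPrefixOf rc) "workload_highPriority") = Fw
  generalize run_list.filter (fun rc => !(["txnRate", "zipfAlpha", "workload_highPriority"] : List String).any
      fun e => PySem.Str.startswith (pvPrefixOf rc) e) = Fn
  by_cases ht : Ft = [] <;> by_cases hz : Fz = [] <;> by_cases hw : Fw = [] <;>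
    by_cases hn : Fn = [] <;>
  simp [ht, hz, hw, hn, PySem.List.sorted_eq_nil_iff, List.length_eq_zero_iff]

-- ===== VERDICT (by name: the statement is the Claim_ definition above) =====
theorem sort_run_list_spec : Claim_equal_sort_run_list := by
  intro run_list _ _
  unfold Spec_sort_run_list
  exact pv_equal run_list
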